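-- pv_equiv track=rewrite | github.com/dz18/Number-Conversion-kit | packages/converters.py | format_bin
-- ===== SOURCE A (Python) =====
-- def format_bin(bin):
--     i = 1
--     result = str()
--
--     while(i <= len(bin)):
--         if i % 4 == 0:
--             result = result + bin[i - 4: i] + " "
--         i += 1
--
--     result = result[:len(result) - 1]
--     return result
-- ===== SOURCE B (Python) =====
-- def format_bin(bin):
--     n = len(bin)
--     return ' '.join(bin[i:i + 4] for i in range(0, n - n % 4, 4))
-- ===== Notes on version B (the rewrite author's own statement) =====
-- stated objective: faster
-- what changed: replaces the per-character while loop (modulo test on every index, repeated string concatenation, then stripping the trailing space) with a single stride-4 pass over group start positions whose slices are space-joined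
import Mathlib
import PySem

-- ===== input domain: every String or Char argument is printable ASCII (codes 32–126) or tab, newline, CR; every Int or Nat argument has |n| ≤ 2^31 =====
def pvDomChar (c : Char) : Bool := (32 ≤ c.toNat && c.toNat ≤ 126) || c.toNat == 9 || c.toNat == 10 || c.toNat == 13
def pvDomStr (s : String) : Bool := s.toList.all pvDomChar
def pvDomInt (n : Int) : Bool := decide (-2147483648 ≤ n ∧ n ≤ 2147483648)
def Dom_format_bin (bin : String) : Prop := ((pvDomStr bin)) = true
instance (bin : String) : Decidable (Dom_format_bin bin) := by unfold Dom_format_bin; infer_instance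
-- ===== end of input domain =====

-- B groups the binary string by a single stride-4 pass over group start positions, space-joined,
-- instead of A's per-character while loop with repeated concatenation and trailing-space strip (objective: faster, measured).

-- ===== PORT A =====
-- while i <= len(bin): if i % 4 == 0: result += bin[i-4:i] + " "; i += 1
def pvALoop (l : List Char) (i : Nat) (result : List Char) : List Char :=
  if _h : i ≤ l.length then
    pvALoop l (i + 1)
      (if i % 4 == 0 then
        result ++ PySem.List.slice l (some ((i : Int) - 4)) (some (i : Int)) ++ [' ']
       else result)
  else result
termination_by l.length + 1 - i

def format_bin (bin : String) : String :=
  -- result[:len(result) - 1]  (res = result after the loop)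
  String.ofList (PySem.List.slice (pvALoop bin.toList 1 []) none
    (some (((pvALoop bin.toList 1 []).length : Int) - 1)))

-- ===== PORT B =====
-- ' '.join(bin[i:i+4] for i in range(0, n - n % 4, 4))
def format_bin_alt (bin : String) : String :=
  String.ofList (PySem.Chars.join [' ']
    ((PySem.List.pyRange 0 ((bin.toList.length : Int) - PySem.Int.mod (bin.toList.length : Int) 4) 4).map
      (fun i => PySem.List.slice bin.toList (some i) (some (i + 4)))))

-- ===== PRECONDITION & SPEC =====
def Spec_format_bin (bin : String) (out : String) : Prop := out = format_bin_alt bin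
instance (bin : String) (out : String) : Decidable (Spec_format_bin bin out) := by unfold Spec_format_bin; infer_instance

-- ===== CLAIM (what is proved, stated in full; the proofs are below) =====
def Claim_equal_format_bin : Prop := ∀ (bin : String), Dom_format_bin bin → Spec_format_bin bin (format_bin bin)

-- ===== LEMMAS AND PROOFS =====

-- the complete 4-chunks of l starting at chunk index k
def pvChunks (l : List Char) (k : Nat) : List (List Char) :=
  if _h : 4 * k + 4 ≤ l.length then (l.drop (4 * k)).take 4 :: pvChunks l (k + 1) else []
termination_by l.length - 4 * k
decreasing_by omega

theorem pvALoop_skip (l : List Char) :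
    ∀ (n i : Nat) (r : List Char), l.length + 1 - i ≤ n →
      (∀ j, i ≤ j → j ≤ l.length → j % 4 ≠ 0) → pvALoop l i r = r := by
  intro n
  induction n with
  | zero =>
    intro i r hle _
    unfold pvALoop
    rw [dif_neg (by omega)]
  | succ n ih =>
    intro i r hle h
    unfold pvALoop
    split
    · next hi =>
      have hmod : i % 4 ≠ 0 := h i le_rfl hi
      have : (i % 4 == 0) = false := by simpa using hmod
      rw [this]
      simp only [Bool.false_eq_true, if_false]
      exact ih (i + 1) r (by omega) (fun j hj hj2 => h j (by omega) hj2)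
    · rfl

theorem pvALoop_chunks (l : List Char) :
    ∀ (n k : Nat) (r : List Char), l.length - 4 * k ≤ n →
      pvALoop l (4 * k + 1) r = r ++ (pvChunks l k).flatMap (fun c => c ++ [' ']) := by
  intro n
  induction n with
  | zero =>
    intro k r hle
    rw [pvALoop_skip l (l.length + 1) _ _ (by omega) (by intro j hj hj2; omega)]
    rw [pvChunks, dif_neg (by omega)]
    simp
  | succ n ih =>
    intro k r hle
    by_cases hk : 4 * k + 4 ≤ l.length
    · -- four iterations: only the fourth (i = 4k+4) appends
      unfold pvALoop
      rw [dif_pos (by omega : 4 * k + 1 ≤ l.length)]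
      rw [show ((4 * k + 1) % 4 == 0) = false from by
        simp only [beq_eq_false_iff_ne, ne_eq]; omega]
      simp only [Bool.false_eq_true, if_false]
      unfold pvALoop
      rw [dif_pos (by omega : 4 * k + 1 + 1 ≤ l.length)]
      rw [show ((4 * k + 1 + 1) % 4 == 0) = false from by
        simp only [beq_eq_false_iff_ne, ne_eq]; omega]
      simp only [Bool.false_eq_true, if_false]
      unfold pvALoop
      rw [dif_pos (by omega : 4 * k + 1 + 1 + 1 ≤ l.length)]
      rw [show ((4 * k + 1 + 1 + 1) % 4 == 0) = false from by
        simp only [beq_eq_false_iff_ne, ne_eq]; omega]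
      simp only [Bool.false_eq_true, if_false]
      unfold pvALoop
      rw [dif_pos (by omega : 4 * k + 1 + 1 + 1 + 1 ≤ l.length)]
      rw [show ((4 * k + 1 + 1 + 1 + 1) % 4 == 0) = true from by
        simp only [beq_iff_eq]; omega]
      simp only [if_true]
      rw [show 4 * k + 1 + 1 + 1 + 1 + 1 = 4 * (k + 1) + 1 from by omega]
      have hslice : PySem.List.slice l (some (((4 * k + 1 + 1 + 1 + 1 : Nat) : Int) - 4))
          (some ((4 * k + 1 + 1 + 1 + 1 : Nat) : Int)) = (l.drop (4 * k)).take 4 := by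
        rw [show (((4 * k + 1 + 1 + 1 + 1 : Nat) : Int) - 4) = ((4 * k : Nat) : Int) from by
          push_cast; ring]
        rw [show ((4 * k + 1 + 1 + 1 + 1 : Nat) : Int) = ((4 * k : Nat) : Int) + ((4 : Nat) : Int) from by
          push_cast; ring]
        rw [PySem.List.slice_natCast_add]
      rw [hslice]
      rw [ih (k + 1) _ (by omega)]
      conv_rhs => rw [pvChunks, dif_pos hk]
      simp [List.append_assoc]
    · -- fewer than 4 characters remain: nothing is appended
      rw [pvALoop_skip l (l.length + 1) _ _ (by omega) (by intro j hj hj2; omega)]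
      rw [pvChunks, dif_neg hk]
      simp

theorem pvPyRange4_nil (a b : Int) (h : b ≤ a) : PySem.List.pyRange a b 4 = [] := by
  rw [PySem.List.pyRange_of_pos a b (by norm_num), if_neg (by omega)]
  simp

theorem pvPyRange4_cons (a b : Int) (h : a < b) :
    PySem.List.pyRange a b 4 = a :: PySem.List.pyRange (a + 4) b 4 := by
  rw [PySem.List.pyRange_of_pos a b (by norm_num),
      PySem.List.pyRange_of_pos (a + 4) b (by norm_num), if_pos h]
  obtain ⟨m, hm⟩ : ∃ m, ((b - a + 4 - 1) / 4).toNat = m + 1 := by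
    refine ⟨((b - a + 4 - 1) / 4).toNat - 1, ?_⟩
    omega
  rw [hm, List.range_succ_eq_map, List.map_cons, List.map_map]
  refine List.cons_eq_cons.mpr ⟨by simp, ?_⟩
  rw [show (if a + 4 < b then ((b - (a + 4) + 4 - 1) / 4).toNat else 0) = m from by
    split <;> omega]
  apply List.map_congr_left
  intro k _
  simp only [Function.comp_apply]
  push_cast
  ring

theorem pvMapSlice_chunks (l : List Char) :
    ∀ (n k : Nat), l.length - 4 * k ≤ n →
      (PySem.List.pyRange ((4 * k : Nat) : Int) ((l.length : Int) - (l.length : Int) % 4) 4).map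
        (fun i => PySem.List.slice l (some i) (some (i + 4))) = pvChunks l k := by
  intro n
  induction n with
  | zero =>
    intro k hle
    rw [pvPyRange4_nil _ _ (by omega), pvChunks, dif_neg (by omega)]
    rfl
  | succ n ih =>
    intro k hle
    by_cases hk : 4 * k + 4 ≤ l.length
    · rw [pvPyRange4_cons _ _ (by omega)]
      rw [List.map_cons]
      have hslice : PySem.List.slice l (some ((4 * k : Nat) : Int)) (some (((4 * k : Nat) : Int) + 4))
          = (l.drop (4 * k)).take 4 := by
        have h2 : ((4 * k : Nat) : Int) + 4 = ((4 * k : Nat) : Int) + ((4 : Nat) : Int) := by norm_num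
        rw [h2, PySem.List.slice_natCast_add]
      rw [hslice]
      have hc : ((4 * k : Nat) : Int) + 4 = ((4 * (k + 1) : Nat) : Int) := by push_cast; ring
      rw [hc, ih (k + 1) (by omega)]
      conv_rhs => rw [pvChunks, dif_pos hk]
    · rw [pvPyRange4_nil _ _ (by omega), pvChunks, dif_neg hk]
      rfl

theorem pvDropLast_join :
    ∀ cs : List (List Char),
      (cs.flatMap (fun c => c ++ [' '])).dropLast = PySem.Chars.join [' '] cs := by
  intro cs
  induction cs with
  | nil => simp [PySem.Chars.join_nil]
  | cons c cs ih =>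
    cases cs with
    | nil => simp [PySem.Chars.join_singleton]
    | cons c2 cs2 =>
      rw [PySem.Chars.join_cons_cons, List.flatMap_cons]
      have hne : ((c2 :: cs2).flatMap (fun c => c ++ [' '])) ≠ [] := by
        simp [List.flatMap_cons]
      rw [List.dropLast_append_of_ne_nil hne, ih]

theorem pvSliceDropLast (res : List Char) :
    PySem.List.slice res none (some ((res.length : Int) - 1)) = res.dropLast := by
  rcases Nat.eq_zero_or_pos res.length with h0 | hpos
  · have : ((res.length : Int) - 1) = -1 := by omega
    rw [this, PySem.List.slice_to_neg_one]
  · have : ((res.length : Int) - 1) = ((res.length - 1 : Nat) : Int) := by omega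
    rw [this, PySem.List.slice_to_natCast, ← List.dropLast_eq_take]

-- ===== VERDICT (by name: the statement is the Claim_ definition above) =====
theorem format_bin_spec : Claim_equal_format_bin := by
  intro bin _
  unfold Spec_format_bin format_bin format_bin_alt
  rw [pvSliceDropLast]
  have hA := pvALoop_chunks bin.toList bin.toList.length 0 [] (by omega)
  norm_num at hA
  rw [hA, pvDropLast_join]
  rw [PySem.Int.mod_eq_emod_of_pos (by norm_num : (0 : Int) < 4)]
  have hB := pvMapSlice_chunks bin.toList bin.toList.length 0 (by omega)
  simp only [Nat.mul_zero, Nat.cast_zero] at hB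
  rw [hB]
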